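-- pv_equiv track=rewrite | github.com/AllenNeuralDynamics/dynamic-foraging-task | src/foraging_gui/RigJsonBuilder.py | FindLatestCalibrationDate
-- ===== SOURCE A (Python) =====
-- def FindLatestCalibrationDate(laser, laser_calibration):
--     """find the latest calibration date for the selected laser"""
--     dates = []
--     for this_date in laser_calibration:
--         if laser in laser_calibration[this_date].keys():
--             dates.append(this_date)
--     sorted_dates = sorted(dates)
--     if sorted_dates == []:
--         return "NA"
--     else:
--         return sorted_dates[-1]
-- ===== SOURCE B (Python) =====
-- def FindLatestCalibrationDate(laser, laser_calibration):
--     """find the latest calibration date for the selected laser"""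
--     best = None
--     for this_date in laser_calibration:
--         if laser in laser_calibration[this_date]:
--             if best is None or this_date > best:
--                 best = this_date
--     return "NA" if best is None else best
-- ===== Notes on version B (the rewrite author's own statement) =====
-- stated objective: simpler
-- what changed: Replaces build-a-list-then-sort-and-take-last with a single pass that keeps a running lexicographic maximum in a scalar, removing the intermediate list and the O(n log n) sort.
import Mathlib
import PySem

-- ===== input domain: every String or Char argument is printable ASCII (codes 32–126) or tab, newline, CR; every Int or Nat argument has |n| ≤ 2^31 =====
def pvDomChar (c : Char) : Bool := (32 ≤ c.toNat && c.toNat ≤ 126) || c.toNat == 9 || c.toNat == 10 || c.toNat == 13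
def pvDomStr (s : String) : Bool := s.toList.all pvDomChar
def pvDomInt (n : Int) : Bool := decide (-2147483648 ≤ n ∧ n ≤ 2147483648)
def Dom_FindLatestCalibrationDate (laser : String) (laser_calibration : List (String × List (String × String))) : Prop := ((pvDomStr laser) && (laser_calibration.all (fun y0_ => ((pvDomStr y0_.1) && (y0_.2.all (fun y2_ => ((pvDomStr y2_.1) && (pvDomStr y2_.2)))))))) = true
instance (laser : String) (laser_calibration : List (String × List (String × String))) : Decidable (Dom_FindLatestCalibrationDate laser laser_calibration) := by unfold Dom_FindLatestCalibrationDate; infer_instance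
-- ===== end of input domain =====

-- B replaces build-list-then-sort-and-take-last by a single pass keeping a running
-- lexicographic maximum in a scalar (objective: simpler; no intermediate list, no sort).

-- ===== PORT A =====
-- laser_calibration[this_date]: association-list lookup, first match (a Python dict has unique keys)
def lcGet (lc : List (String × List (String × String))) (k : String) : List (String × String) :=
  ((lc.find? (fun p => p.1 == k)).map Prod.snd).getD []

def FindLatestCalibrationDate (laser : String) (laser_calibration : List (String × List (String × String))) : String :=
  let dates := laser_calibration.foldl
    (fun dates p =>
      if (lcGet laser_calibration p.1).any (fun q => q.1 == laser) then dates ++ [p.1] else dates) []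
  let sorted_dates := PySem.List.sorted dates (fun x => x) false
  if sorted_dates = [] then "NA"
  else PySem.List.pyGetD sorted_dates (-1) "NA"   -- sorted_dates[-1]; the branch guarantees the index is in range

-- ===== PORT B =====
def FindLatestCalibrationDate_alt (laser : String) (laser_calibration : List (String × List (String × String))) : String :=
  let best := laser_calibration.foldl
    (fun best p =>
      if (lcGet laser_calibration p.1).any (fun q => q.1 == laser) then
        match best with
        | none => some p.1
        | some b => if b < p.1 then some p.1 else some b
      else best) (none : Option String)
  match best with
  | none => "NA"
  | some b => b

-- ===== PRECONDITION & SPEC =====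
def Spec_FindLatestCalibrationDate (laser : String) (laser_calibration : List (String × List (String × String))) (out : String) : Prop := out = FindLatestCalibrationDate_alt laser laser_calibration
instance (laser : String) (laser_calibration : List (String × List (String × String))) (out : String) : Decidable (Spec_FindLatestCalibrationDate laser laser_calibration out) := by unfold Spec_FindLatestCalibrationDate; infer_instance

-- ===== CLAIM (what is proved, stated in full; the proofs are below) =====
def Claim_equal_FindLatestCalibrationDate : Prop := ∀ (laser : String) (laser_calibration : List (String × List (String × String))), Dom_FindLatestCalibrationDate laser laser_calibration → Spec_FindLatestCalibrationDate laser laser_calibration (FindLatestCalibrationDate laser laser_calibration)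

-- ===== LEMMAS AND PROOFS =====

-- B's loop body, written with the candidate date already extracted
def pvStep (best : Option String) (x : String) : Option String :=
  match best with
  | none => some x
  | some b => if b < x then some x else some b

-- B's loop, once started, is a plain running maximum of strings
lemma pvStep_foldl_some (t : List String) (b : String) :
    t.foldl pvStep (some b) = some (t.foldl (fun b x => if b < x then x else b) b) := by
  induction t generalizing b with
  | nil => rfl
  | cons x t ih =>
      simp only [List.foldl_cons, pvStep]
      split <;> exact ih _

lemma pvFoldMax_mem (t : List String) (b : String) :
    t.foldl (fun b x => if b < x then x else b) b = b ∨
    t.foldl (fun b x => if b < x then x else b) b ∈ t := by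
  induction t generalizing b with
  | nil => exact Or.inl rfl
  | cons x t ih =>
      simp only [List.foldl_cons]
      split
      · rcases ih x with h | h
        · exact Or.inr (by rw [h]; exact List.mem_cons_self)
        · exact Or.inr (List.mem_cons_of_mem _ h)
      · rcases ih b with h | h
        · exact Or.inl h
        · exact Or.inr (List.mem_cons_of_mem _ h)

lemma pvFoldMax_ge (t : List String) (b : String) :
    b ≤ t.foldl (fun b x => if b < x then x else b) b ∧
    ∀ y ∈ t, y ≤ t.foldl (fun b x => if b < x then x else b) b := by
  induction t generalizing b with
  | nil => exact ⟨le_refl _, by simp⟩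
  | cons x t ih =>
      simp only [List.foldl_cons]
      split
      · rename_i hlt
        refine ⟨le_trans (le_of_lt hlt) (ih x).1, ?_⟩
        intro y hy
        rcases List.mem_cons.mp hy with rfl | hy
        · exact (ih y).1
        · exact (ih x).2 y hy
      · rename_i hnlt
        refine ⟨(ih b).1, ?_⟩
        intro y hy
        rcases List.mem_cons.mp hy with rfl | hy
        · exact le_trans (not_lt.mp hnlt) (ih b).1
        · exact (ih b).2 y hy

-- the last element of a ≤-sorted nonempty list dominates every element
lemma pvPairwise_getLast_max (L : List String) (h : L.Pairwise (· ≤ ·)) (hne : L ≠ []) :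
    ∀ y ∈ L, y ≤ L.getLast hne := by
  induction L with
  | nil => simp
  | cons a t ih =>
      intro y hy
      rcases List.mem_cons.mp hy with rfl | hy
      · cases t with
        | nil => simp [List.getLast]
        | cons b s =>
            have hmem : (b :: s : List String).getLast (by simp) ∈ b :: s := List.getLast_mem _
            have := (List.pairwise_cons.mp h).1 _ hmem
            simpa [List.getLast_cons] using this
      · have ht : t ≠ [] := List.ne_nil_of_mem hy
        have := ih (List.pairwise_cons.mp h).2 ht y hy
        cases t with
        | nil => simp at hy
        | cons b s => simpa [List.getLast_cons] using this

-- the core fact: sorted-then-last equals the running maximum, for any list of keys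
lemma pvSorted_last_eq_fold (K : List String) :
    (if PySem.List.sorted K (fun x => x) false = [] then "NA"
     else PySem.List.pyGetD (PySem.List.sorted K (fun x => x) false) (-1) "NA")
    = (match K.foldl pvStep none with
       | none => "NA"
       | some b => b) := by
  cases K with
  | nil => rfl
  | cons x t =>
      have hne : PySem.List.sorted (x :: t) (fun x => x) false ≠ [] := by
        simp [PySem.List.sorted_eq_nil_iff]
      rw [if_neg hne, PySem.List.pyGetD_neg_one _ _ hne]
      simp only [List.foldl_cons, pvStep, pvStep_foldl_some]
      set M := t.foldl (fun b x => if b < x then x else b) x with hM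
      set L := (PySem.List.sorted (x :: t) (fun x => x) false).getLast hne with hL
      have hLmem : L ∈ x :: t := by
        rw [← PySem.List.mem_sorted (x :: t) (fun x => x) false]
        exact List.getLast_mem hne
      have hMmem : M ∈ x :: t := by
        rcases pvFoldMax_mem t x with h | h
        · exact h ▸ List.mem_cons_self
        · exact List.mem_cons_of_mem _ h
      have hMge : ∀ y ∈ x :: t, y ≤ M := by
        intro y hy
        rcases List.mem_cons.mp hy with rfl | hy
        · exact (pvFoldMax_ge t y).1
        · exact (pvFoldMax_ge t x).2 y hy
      have hLge : ∀ y ∈ x :: t, y ≤ L := by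
        intro y hy
        exact pvPairwise_getLast_max _ (PySem.List.sorted_pairwise (x :: t) (fun x => x)) hne y
          ((PySem.List.mem_sorted (x :: t) (fun x => x) false y).mpr hy)
      exact le_antisymm (hMge L hLmem) (hLge M hMmem)

-- ===== VERDICT (by name: the statement is the Claim_ definition above) =====
theorem FindLatestCalibrationDate_spec : Claim_equal_FindLatestCalibrationDate := by
  intro laser lc _
  unfold Spec_FindLatestCalibrationDate FindLatestCalibrationDate FindLatestCalibrationDate_alt
  simp only []
  rw [PySem.List.foldl_append_if (fun p => (lcGet lc p.1).any (fun q => q.1 == laser)) Prod.fst lc []]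
  have hB : lc.foldl
      (fun best p =>
        if (lcGet lc p.1).any (fun q => q.1 == laser) then
          match best with
          | none => some p.1
          | some b => if b < p.1 then some p.1 else some b
        else best) (none : Option String)
      = ((lc.filter (fun p => (lcGet lc p.1).any (fun q => q.1 == laser))).map Prod.fst).foldl pvStep none := by
    have hfun : (fun (best : Option String) (p : String × List (String × String)) =>
        if (lcGet lc p.1).any (fun q => q.1 == laser) then
          match best with
          | none => some p.1
          | some b => if b < p.1 then some p.1 else some b
        else best)
        = (fun best p => if (lcGet lc p.1).any (fun q => q.1 == laser) then pvStep best p.1 else best) := by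
      funext best p
      cases best <;> rfl
    rw [hfun, List.foldl_map, List.foldl_filter]
  rw [hB]
  exact pvSorted_last_eq_fold _
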